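-- pv_equiv track=rewrite | github.com/JunJie-zhang-o/EliteRobots-Drive-For-Robodk | PostProcess/CS/Elibot_CS_TASK.py | get_safe_name
-- ===== SOURCE A (Python) =====
-- def get_safe_name(progname, max_chars = 20):
--     """Get a safe program name"""
--     # Remove special characters
--     for c in r'-[]/\;,><&*:%=+@!#^()|?^':
--         progname = progname.replace(c,'')
--     # Set a program name by default:
--     if len(progname) <= 0:
--         progname = 'Program'
--     # Force the program to start with a letter (not a number)
--     if progname[0].isdigit():
--         progname = 'Robodk_' + progname
--     # Set the maximum size of a program (number of characters)
--     if len(progname) > max_chars: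
--         progname = progname[:max_chars]
--     return progname
-- ===== SOURCE B (Python) =====
-- FORBIDDEN = frozenset(r'-[]/\;,><&*:%=+@!#^()|?^')
--
-- def get_safe_name(progname, max_chars=20):
--     """Get a safe program name"""
--     # One membership-filtered pass over the input instead of one replace() per blacklisted char
--     progname = ''.join(ch for ch in progname if ch not in FORBIDDEN)
--     if not progname:
--         progname = 'Program'
--     if progname[0].isdigit():
--         progname = 'Robodk_' + progname
--     return progname[:max_chars]
-- ===== Notes on version B (the rewrite author's own statement) =====
-- stated objective: idiomatic
-- what changed: Replaces the k full-string replace() passes (one per blacklisted character) with a single filtered pass over the input using a frozenset, and folds the length cap into one unconditional slice.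
import Mathlib
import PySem

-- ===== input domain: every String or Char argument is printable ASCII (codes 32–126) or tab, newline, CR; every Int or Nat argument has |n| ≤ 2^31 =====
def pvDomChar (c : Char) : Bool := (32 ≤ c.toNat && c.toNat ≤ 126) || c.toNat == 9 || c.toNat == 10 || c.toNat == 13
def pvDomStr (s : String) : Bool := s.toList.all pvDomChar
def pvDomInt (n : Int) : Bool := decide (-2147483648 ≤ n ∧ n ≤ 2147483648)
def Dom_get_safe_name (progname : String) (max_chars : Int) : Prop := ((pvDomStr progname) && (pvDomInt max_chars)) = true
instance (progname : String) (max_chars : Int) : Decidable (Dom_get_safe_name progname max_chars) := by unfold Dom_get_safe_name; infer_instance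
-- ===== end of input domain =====

-- B changes: one membership-filtered pass over the input (frozenset) instead of one replace() per
-- blacklisted character, and an unconditional final slice; same return value (idiomatic objective).

-- ===== PORT A =====
-- the blacklist string A iterates over, as a list of characters
def pvBlacklist : List Char := "-[]/\\;,><&*:%=+@!#^()|?^".toList

def get_safe_name (progname : String) (max_chars : Int) : String :=
  -- for c in blacklist: progname = progname.replace(c, '')
  let p0 := pvBlacklist.foldl (fun s c => PySem.Chars.replace s [c] []) progname.toList
  -- if len(progname) <= 0: progname = 'Program'
  let p1 := if (p0.length : Int) ≤ 0 then "Program".toList else p0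
  -- if progname[0].isdigit(): progname = 'Robodk_' + progname   (p1 is never empty here)
  let p2 := if PySem.Chars.isdigit (PySem.List.pyGetD p1 0 ' ') then "Robodk_".toList ++ p1 else p1
  -- if len(progname) > max_chars: progname = progname[:max_chars]
  let p3 := if (p2.length : Int) > max_chars then PySem.List.slice p2 none (some max_chars) else p2
  String.ofList p3

-- ===== PORT B =====
-- FORBIDDEN = frozenset(r'-[]/\;,><&*:%=+@!#^()|?^')
def pvForbidden : PySem.Set Char := PySem.Set.ofList "-[]/\\;,><&*:%=+@!#^()|?^".toList

def get_safe_name_alt (progname : String) (max_chars : Int) : String :=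
  -- ''.join(ch for ch in progname if ch not in FORBIDDEN)
  let q0 := progname.toList.filter (fun ch => !(pvForbidden.contains ch))
  -- if not progname: progname = 'Program'
  let q1 := if q0.isEmpty then "Program".toList else q0
  -- if progname[0].isdigit(): progname = 'Robodk_' + progname   (q1 is never empty here)
  let q2 := if PySem.Chars.isdigit (PySem.List.pyGetD q1 0 ' ') then "Robodk_".toList ++ q1 else q1
  -- return progname[:max_chars]
  String.ofList (PySem.List.slice q2 none (some max_chars))

-- ===== PRECONDITION & SPEC =====
def Spec_get_safe_name (progname : String) (max_chars : Int) (out : String) : Prop := out = get_safe_name_alt progname max_chars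
instance (progname : String) (max_chars : Int) (out : String) : Decidable (Spec_get_safe_name progname max_chars out) := by unfold Spec_get_safe_name; infer_instance

-- ===== CLAIM (what is proved, stated in full; the proofs are below) =====
def Claim_equal_get_safe_name : Prop := ∀ (progname : String) (max_chars : Int), Dom_get_safe_name progname max_chars → Spec_get_safe_name progname max_chars (get_safe_name progname max_chars)

-- ===== LEMMAS AND PROOFS =====

-- replace s [c] [] deletes every occurrence of c, i.e. filters it out
theorem pv_go_single (c : Char) : ∀ (fuel : Nat) (l acc : List Char), l.length ≤ fuel →
    PySem.Chars.replace.go [c] [] fuel l acc = acc.reverse ++ l.filter (· ≠ c) := by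
  intro fuel
  induction fuel with
  | zero =>
    intro l acc h
    have : l = [] := List.eq_nil_of_length_eq_zero (Nat.le_zero.mp h)
    subst this; simp [PySem.Chars.replace.go]
  | succ n ih =>
    intro l acc h
    cases l with
    | nil => simp [PySem.Chars.replace.go]
    | cons x t =>
      by_cases hx : x = c
      · subst hx
        rw [show PySem.Chars.replace.go [x] [] (n+1) (x :: t) acc
              = PySem.Chars.replace.go [x] [] n t acc by
            simp [PySem.Chars.replace.go, List.isPrefixOf]]
        rw [ih t acc (by simpa using Nat.le_of_succ_le_succ h)]
        simp
      · rw [show PySem.Chars.replace.go [c] [] (n+1) (x :: t) acc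
              = PySem.Chars.replace.go [c] [] n t (x :: acc) by
            simp [PySem.Chars.replace.go, List.isPrefixOf, Ne.symm hx]]
        rw [ih t (x :: acc) (by simpa using Nat.le_of_succ_le_succ h)]
        simp [hx]

theorem pv_replace_single (c : Char) (s : List Char) :
    PySem.Chars.replace s [c] [] = s.filter (· ≠ c) := by
  rw [show PySem.Chars.replace s [c] [] = PySem.Chars.replace.go [c] [] s.length s [] by
      simp [PySem.Chars.replace]]
  simpa using pv_go_single c s.length s [] (le_refl _)

-- folding the per-character deletions over a blacklist = one filtered pass
theorem pv_foldl_replace (bs : List Char) : ∀ (s : List Char),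
    bs.foldl (fun s c => PySem.Chars.replace s [c] []) s
      = s.filter (fun ch => !(bs.contains ch)) := by
  induction bs with
  | nil => intro s; simp
  | cons b bs ih =>
    intro s
    simp only [List.foldl_cons]
    rw [pv_replace_single, ih, List.filter_filter]
    apply List.filter_congr
    intro x _
    by_cases hb : x = b <;> simp [hb]

theorem pv_core_eq (s : List Char) :
    pvBlacklist.foldl (fun s c => PySem.Chars.replace s [c] []) s
      = s.filter (fun ch => !(pvForbidden.contains ch)) := by
  rw [pv_foldl_replace]
  apply List.filter_congr
  intro x _
  have : pvForbidden.contains x = pvBlacklist.contains x := by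
    simp [pvForbidden, pvBlacklist, PySem.Set.mem_ofList]
  rw [this]

-- a slice to max_chars is the identity when the list is short enough
theorem pv_slice_short (l : List Char) (m : Int) (h : (l.length : Int) ≤ m) :
    PySem.List.slice l none (some m) = l := by
  rw [PySem.List.slice_to (xs := l) (b := m) (by omega)]
  exact List.take_of_length_le (by omega)

-- the conditional cap of A equals B's unconditional slice
theorem pv_cap (l : List Char) (m : Int) :
    (if (l.length : Int) > m then PySem.List.slice l none (some m) else l)
      = PySem.List.slice l none (some m) := by
  by_cases h : (l.length : Int) > m
  · rw [if_pos h]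
  · rw [if_neg h, pv_slice_short l m (by omega)]

-- ===== VERDICT (by name: the statement is the Claim_ definition above) =====
theorem get_safe_name_spec : Claim_equal_get_safe_name := by
  intro progname max_chars _
  unfold Spec_get_safe_name get_safe_name get_safe_name_alt
  simp only [pv_core_eq]
  set q0 := progname.toList.filter (fun ch => !(pvForbidden.contains ch)) with hq
  have hempty : ((q0.length : Int) ≤ 0) ↔ (q0.isEmpty = true) := by
    rw [List.isEmpty_iff, ← List.length_eq_zero_iff]; omega
  by_cases h0 : q0.isEmpty
  · rw [if_pos (hempty.mpr h0), if_pos h0, pv_cap]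
  · rw [if_neg (fun h => h0 (hempty.mp h)), if_neg h0, pv_cap]
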